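-- pv_equiv track=rewrite | github.com/green-fox-academy/nicolas-todo-app | functions.py | rebuild_list
-- ===== SOURCE A (Python) =====
-- def row_parser(row, indicator_symbol):
--     updated_row = ""
--     indicator = False
--     for char in row:
--         if char == indicator_symbol:
--             indicator = True
--         if indicator:
--             updated_row = updated_row + char
--     return updated_row
--
-- def rebuild_list(given_list, method, chosen_row):
--     counter = 1
--     result_list = ""
--     for row in given_list:
--         if method == "remove":
--             if counter < chosen_row:
--                 result_list = result_list + row
--             elif counter > chosen_row:
--                 result_list = result_list + "{} {}".format(counter - 1, row_parser(row, "-"))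
--         elif method == "check":
--             if counter == chosen_row:
--                 result_list = result_list + "{} - [x{}".format(counter, row_parser(row, "]"))
--             else:
--                 result_list = result_list + row
--         counter = counter + 1
--     return result_list
-- ===== SOURCE B (Python) =====
-- def row_parser(row, indicator_symbol):
--     idx = row.find(indicator_symbol)
--     return row[idx:] if idx != -1 else ""
--
-- def rebuild_list(given_list, method, chosen_row):
--     def piece(i, row):
--         c = i + 1
--         if method == "remove":
--             if c < chosen_row:
--                 return row
--             if c > chosen_row:
--                 return "{} {}".format(i, row_parser(row, "-"))
--             return ""
--         if method == "check":
--             if c == chosen_row: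
--                 return "{} - [x{}".format(c, row_parser(row, "]"))
--             return row
--         return ""
--     return "".join(piece(i, row) for i, row in enumerate(given_list))
-- ===== Notes on version B (the rewrite author's own statement) =====
-- stated objective: simpler
-- what changed: row_parser now locates the indicator with str.find and returns one slice instead of a char-by-char flag-and-accumulate loop, and rebuild_list becomes a stateless join over enumerate(given_list) instead of a counter/accumulator loop.
import Mathlib
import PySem

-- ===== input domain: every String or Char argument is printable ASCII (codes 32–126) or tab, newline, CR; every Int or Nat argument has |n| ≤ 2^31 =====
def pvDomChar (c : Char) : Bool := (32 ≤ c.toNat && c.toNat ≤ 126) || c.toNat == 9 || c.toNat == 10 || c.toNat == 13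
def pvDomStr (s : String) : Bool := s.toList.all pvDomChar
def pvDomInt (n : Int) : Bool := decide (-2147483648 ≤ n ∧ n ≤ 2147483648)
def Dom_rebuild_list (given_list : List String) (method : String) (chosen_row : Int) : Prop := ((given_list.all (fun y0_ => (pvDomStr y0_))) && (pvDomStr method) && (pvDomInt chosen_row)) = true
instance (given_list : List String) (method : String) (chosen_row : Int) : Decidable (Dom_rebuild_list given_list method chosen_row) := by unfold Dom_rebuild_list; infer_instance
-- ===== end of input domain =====

-- B replaces A's flag-and-accumulate row_parser by find+slice and A's counter/accumulator
-- loop by a stateless join over enumerate; same return value on every input (A is total).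

-- ===== PORT A =====
-- A's row_parser: fold over the characters carrying (updated_row, indicator).
def pvRowStepA (sym : Char) (st : List Char × Bool) (c : Char) : List Char × Bool :=
  let ind := if c = sym then true else st.2
  (if ind then st.1 ++ [c] else st.1, ind)

def pvRowParserA (row : List Char) (sym : Char) : List Char :=
  (row.foldl (pvRowStepA sym) ([], false)).1

def rebuild_list (given_list : List String) (method : String) (chosen_row : Int) : String :=
  String.ofList (given_list.foldl (fun (st : Int × List Char) row =>
    let counter := st.1
    let res :=
      if method = "remove" then
        if counter < chosen_row then st.2 ++ row.toList
        else if counter > chosen_row then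
          st.2 ++ PySem.Int.toChars (counter - 1) ++ [' '] ++ pvRowParserA row.toList '-'
        else st.2
      else if method = "check" then
        if counter = chosen_row then
          st.2 ++ PySem.Int.toChars counter ++ [' ', '-', ' ', '[', 'x'] ++ pvRowParserA row.toList ']'
        else st.2 ++ row.toList
      else st.2
    (counter + 1, res)) (1, ([] : List Char))).2

-- ===== PORT B =====
-- B's row_parser: idx = row.find(sym); row[idx:] if idx != -1 else "".
def pvRowParserB (row : List Char) (sym : Char) : List Char :=
  let idx := PySem.Chars.find row [sym]
  if idx ≠ -1 then PySem.List.slice row (some idx) none else []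

-- B's piece(i, row) helper.
def pvPiece (method : String) (chosen_row : Int) (p : Int × String) : List Char :=
  let c := p.1 + 1
  if method = "remove" then
    if c < chosen_row then p.2.toList
    else if c > chosen_row then PySem.Int.toChars p.1 ++ [' '] ++ pvRowParserB p.2.toList '-'
    else []
  else if method = "check" then
    if c = chosen_row then PySem.Int.toChars c ++ [' ', '-', ' ', '[', 'x'] ++ pvRowParserB p.2.toList ']'
    else p.2.toList
  else []

def rebuild_list_alt (given_list : List String) (method : String) (chosen_row : Int) : String :=
  String.ofList (PySem.Chars.join [] ((PySem.List.enumerate given_list 0).map (pvPiece method chosen_row)))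

-- ===== PRECONDITION & SPEC =====
def Spec_rebuild_list (given_list : List String) (method : String) (chosen_row : Int) (out : String) : Prop := out = rebuild_list_alt given_list method chosen_row
instance (given_list : List String) (method : String) (chosen_row : Int) (out : String) : Decidable (Spec_rebuild_list given_list method chosen_row out) := by unfold Spec_rebuild_list; infer_instance

-- ===== CLAIM (what is proved, stated in full; the proofs are below) =====
def Claim_equal_rebuild_list : Prop := ∀ (given_list : List String) (method : String) (chosen_row : Int), Dom_rebuild_list given_list method chosen_row → Spec_rebuild_list given_list method chosen_row (rebuild_list given_list method chosen_row)

-- ===== LEMMAS AND PROOFS =====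

-- the predicate "character is not yet the indicator", named so simp keeps it intact.
def pvKeep (sym : Char) (c : Char) : Bool := !(c = sym)

-- "".join over a list of pieces is flatten.
theorem pvJoin_nil_eq_flatten (ls : List (List Char)) :
    PySem.Chars.join [] ls = ls.flatten := by
  induction ls with
  | nil => simp [PySem.Chars.join_nil]
  | cons p rest ih =>
    cases rest with
    | nil => simp [PySem.Chars.join, List.intercalate]
    | cons q r => simp only [PySem.Chars.join_cons_cons, List.flatten_cons] at *; simp [ih]

-- once the indicator is set, A's row_parser appends everything.
theorem pvRowStepA_true (sym : Char) (l : List Char) (u : List Char) :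
    l.foldl (pvRowStepA sym) (u, true) = (u ++ l, true) := by
  induction l generalizing u with
  | nil => simp
  | cons c t ih => simp [pvRowStepA, ih]

-- A's row_parser drops the prefix before the first indicator.
theorem pvRowParserA_eq_dropWhile (l : List Char) (sym : Char) :
    pvRowParserA l sym = l.dropWhile (pvKeep sym) := by
  induction l with
  | nil => simp [pvRowParserA]
  | cons c t ih =>
    by_cases h : c = sym
    · subst h
      simp [pvRowParserA, List.dropWhile, pvRowStepA, pvRowStepA_true, pvKeep]
    · have hstep : pvRowStepA sym ([], false) c = ([], false) := by
        simp [pvRowStepA, h]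
      have hkeep : pvKeep sym c = true := by simp [pvKeep, h]
      calc pvRowParserA (c :: t) sym
          = pvRowParserA t sym := by
            unfold pvRowParserA; rw [List.foldl_cons, hstep]
        _ = t.dropWhile (pvKeep sym) := ih
        _ = (c :: t).dropWhile (pvKeep sym) := by rw [List.dropWhile_cons_of_pos hkeep]

-- dropping up to the first index where [sym] is a prefix is dropWhile (pvKeep sym).
theorem pvDrop_first_eq_dropWhile (sym : Char) (l : List Char) (n : Nat)
    (h1 : [sym] <+: l.drop n) (h2 : ∀ i < n, ¬ [sym] <+: l.drop i) :
    l.drop n = l.dropWhile (pvKeep sym) := by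
  induction l generalizing n with
  | nil => simp at h1
  | cons c t ih =>
    cases n with
    | zero =>
      simp only [List.drop_zero] at h1 ⊢
      rcases (List.cons_prefix_cons.mp h1) with ⟨hc, -⟩
      rw [List.dropWhile_cons_of_neg (by simp [pvKeep, hc.symm])]
    | succ m =>
      have hc : pvKeep sym c = true := by
        simp only [pvKeep, Bool.not_eq_eq_eq_not, Bool.not_true, decide_eq_false_iff_not]
        intro hcs
        exact h2 0 (Nat.succ_pos m) (by simp [hcs, List.cons_prefix_cons])
      have h2' : ∀ i < m, ¬ [sym] <+: t.drop i := by
        intro i hi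
        have := h2 (i + 1) (by omega)
        simpa using this
      have h1' : [sym] <+: t.drop m := by simpa using h1
      rw [List.drop_succ_cons, List.dropWhile_cons_of_pos hc]
      exact ih m h1' h2'

-- B's row_parser computes the same suffix.
theorem pvRowParserB_eq_dropWhile (l : List Char) (sym : Char) :
    pvRowParserB l sym = l.dropWhile (pvKeep sym) := by
  unfold pvRowParserB
  by_cases h : PySem.Chars.find l [sym] = -1
  · rw [if_neg (by simp [h])]
    have hni : ¬ [sym] <:+: l := (PySem.Chars.find_eq_neg_one_iff l [sym]).mp h
    have hall : ∀ x ∈ l, pvKeep sym x = true := by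
      intro x hx
      simp only [pvKeep, Bool.not_eq_eq_eq_not, Bool.not_true, decide_eq_false_iff_not]
      intro hxs
      subst hxs
      rcases List.append_of_mem hx with ⟨s, t, rfl⟩
      exact hni ⟨s, t, by simp⟩
    exact (List.dropWhile_eq_nil_iff.mpr hall).symm
  · have hpos : 0 ≤ PySem.Chars.find l [sym] := by
      have := PySem.Chars.neg_one_le_find l [sym]
      omega
    rcases PySem.Chars.find_spec hpos with ⟨hpre, hmin⟩
    rw [if_pos (by simp [h]), PySem.List.slice_from _ hpos]
    exact pvDrop_first_eq_dropWhile sym l _ hpre hmin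

theorem pvRowParser_eq (l : List Char) (sym : Char) :
    pvRowParserA l sym = pvRowParserB l sym := by
  rw [pvRowParserA_eq_dropWhile, pvRowParserB_eq_dropWhile]

-- main loop invariant: A's fold from counter k+1 is acc ++ B's joined pieces from offset k.
theorem pvFold_eq (method : String) (chosen_row : Int) (l : List String) :
    ∀ (k : Int) (acc : List Char),
    (l.foldl (fun (st : Int × List Char) row =>
      let counter := st.1
      let res :=
        if method = "remove" then
          if counter < chosen_row then st.2 ++ row.toList
          else if counter > chosen_row then
            st.2 ++ PySem.Int.toChars (counter - 1) ++ [' '] ++ pvRowParserA row.toList '-'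
          else st.2
        else if method = "check" then
          if counter = chosen_row then
            st.2 ++ PySem.Int.toChars counter ++ [' ', '-', ' ', '[', 'x'] ++ pvRowParserA row.toList ']'
          else st.2 ++ row.toList
        else st.2
      (counter + 1, res)) (k + 1, acc)).2
    = acc ++ PySem.Chars.join [] ((PySem.List.enumerate l k).map (pvPiece method chosen_row)) := by
  induction l with
  | nil => intro k acc; simp [PySem.List.enumerate, PySem.Chars.join_nil]
  | cons row t ih =>
    intro k acc
    rw [PySem.List.enumerate_cons, List.map_cons, pvJoin_nil_eq_flatten, List.flatten_cons,
      ← pvJoin_nil_eq_flatten]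
    simp only [List.foldl_cons]
    have hpiece :
        (if method = "remove" then
          if k + 1 < chosen_row then acc ++ row.toList
          else if k + 1 > chosen_row then
            acc ++ PySem.Int.toChars (k + 1 - 1) ++ [' '] ++ pvRowParserA row.toList '-'
          else acc
        else if method = "check" then
          if k + 1 = chosen_row then
            acc ++ PySem.Int.toChars (k + 1) ++ [' ', '-', ' ', '[', 'x'] ++ pvRowParserA row.toList ']'
          else acc ++ row.toList
        else acc) = acc ++ pvPiece method chosen_row (k, row) := by
      simp only [pvPiece, pvRowParser_eq]
      have hk : k + 1 - 1 = k := by ring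
      rw [hk]
      split_ifs <;> simp
    rw [ih (k + 1)]
    simp only [hpiece]
    simp

-- ===== VERDICT (by name: the statement is the Claim_ definition above) =====
theorem rebuild_list_spec : Claim_equal_rebuild_list := by
  intro given_list method chosen_row _
  unfold Spec_rebuild_list rebuild_list rebuild_list_alt
  have h := pvFold_eq method chosen_row given_list 0 []
  simp only [zero_add, List.nil_append] at h
  rw [h]
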